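-- pv_equiv track=rewrite | github.com/kaluginpeter/Algorithms_and_structures_tasks | CodeWars/5kyu/Chess_Fun_9_Bishops_And_Rooks.py | bishops_and_rooks
-- ===== SOURCE A (Python) =====
-- def bishops_and_rooks(M):
--     n, m = len(M), len(M[0])
--     for i in range(n):
--         for j in range(m):
--             if M[i][j] == -1:
--                 x, y = i - 1, j - 1
--                 while x >= 0 and y >= 0:
--                     if M[x][y] not in {0, 2}: break
--                     M[x][y] = 2
--                     x, y = x - 1, y - 1
--                 x, y = i - 1, j + 1
--                 while x >= 0 and y < m:
--                     if M[x][y] not in {0, 2}: break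
--                     M[x][y] = 2
--                     x, y = x - 1, y + 1
--                 x, y = i + 1, j - 1
--                 while x < n and y >= 0:
--                     if M[x][y] not in {0, 2}: break
--                     M[x][y] = 2
--                     x, y = x + 1, y - 1
--                 x, y = i + 1, j + 1
--                 while x < n and y < m:
--                     if M[x][y] not in {0, 2}: break
--                     M[x][y] = 2
--                     x, y = x + 1, y + 1
--             elif M[i][j] == 1:
--                 x = i - 1
--                 while x >= 0:
--                     if M[x][j] not in {0, 2}: break
--                     M[x][j] = 2
--                     x -= 1
--                 x = i + 1
--                 while x < n:
--                     if M[x][j] not in {0, 2}: break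
--                     M[x][j] = 2
--                     x += 1
--                 y = j - 1
--                 while y >= 0:
--                     if M[i][y] not in {0, 2}: break
--                     M[i][y] = 2
--                     y -= 1
--                 y = j + 1
--                 while y < m:
--                     if M[i][y] not in {0, 2}: break
--                     M[i][y] = 2
--                     y += 1
--     return sum(sum(not cell for cell in row) for row in M)
-- ===== SOURCE B (Python) =====
-- def bishops_and_rooks(M):
--     # Line sweeps: for each of the 8 ray directions, sweep each line once with a
--     # flag that turns on after a matching piece and off at any blocker; the board
--     # is never mutated and attacked coordinates are collected in a set.
--     n, m = len(M), len(M[0])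
--     attacked = set()
--
--     def scan(x, y, dx, dy, piece):
--         flag = False
--         while 0 <= x < n and 0 <= y < m:
--             v = M[x][y]
--             passable = v == 0 or v == 2
--             if flag and passable:
--                 attacked.add((x, y))
--             flag = v == piece or (flag and passable)
--             x += dx
--             y += dy
--
--     for i in range(n):                       # rook rays along rows
--         scan(i, 0, 0, 1, 1)
--         scan(i, m - 1, 0, -1, 1)
--     for j in range(m):                       # rook rays along columns
--         scan(0, j, 1, 0, 1)
--         scan(n - 1, j, -1, 0, 1)
--     for j in range(m):                       # bishop rays, lines started on the top/bottom edge
--         scan(0, j, 1, 1, -1)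
--         scan(0, j, 1, -1, -1)
--         scan(n - 1, j, -1, 1, -1)
--         scan(n - 1, j, -1, -1, -1)
--     for i in range(1, n - 1):                # bishop rays, lines started on the left/right edge
--         scan(i, 0, 1, 1, -1)
--         scan(i, 0, -1, 1, -1)
--         scan(i, m - 1, 1, -1, -1)
--         scan(i, m - 1, -1, -1, -1)
--
--     return sum(1 for i, row in enumerate(M)
--                  for j, v in enumerate(row)
--                  if v == 0 and (i, j) not in attacked)
-- ===== Notes on version B (the rewrite author's own statement) =====
-- stated objective: alternative
-- what changed: A marks attacked cells by walking rays outward from every piece into the mutated board; B instead does 8 directional line sweeps over the never-mutated board, each carrying a one-cell flag (matching piece seen and not yet blocked), collects attacked coordinates in a set, and counts in one final pass.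
import Mathlib
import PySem

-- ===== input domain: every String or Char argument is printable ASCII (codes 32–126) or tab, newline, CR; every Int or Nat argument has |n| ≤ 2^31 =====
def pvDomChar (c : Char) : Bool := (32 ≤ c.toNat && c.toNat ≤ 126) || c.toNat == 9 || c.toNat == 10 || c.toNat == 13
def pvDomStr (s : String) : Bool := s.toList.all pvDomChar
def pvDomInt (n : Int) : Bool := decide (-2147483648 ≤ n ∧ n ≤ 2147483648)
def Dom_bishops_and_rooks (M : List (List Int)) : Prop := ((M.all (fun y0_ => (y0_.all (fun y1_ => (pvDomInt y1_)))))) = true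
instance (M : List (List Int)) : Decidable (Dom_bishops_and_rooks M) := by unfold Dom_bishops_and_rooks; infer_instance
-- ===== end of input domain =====

-- B replaces A's per-piece ray marking by 8 directional line sweeps with a carry
-- flag plus an attacked-coordinate set; A mutates its argument in place, B does
-- not — the equivalence proved is about the return value.

-- ===== PORT A =====
-- A's `M[x][y]` reads/writes happen only with loop-guarded in-range non-negative
-- indices (given Pre_), so plain getD/set with .toNat is exact there.
def pvAget (G : List (List Int)) (x y : Int) : Int := (G.getD x.toNat []).getD y.toNat 0

def pvAset (G : List (List Int)) (x y : Int) (v : Int) : List (List Int) :=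
  G.set x.toNat ((G.getD x.toNat []).set y.toNat v)

-- one of A's eight `while` ray loops, parameterised by the direction (dx,dy);
-- the loop guard `0 ≤ x < n ∧ 0 ≤ y < m` is A's guard: the two bounds A's source
-- omits per loop hold invariantly along its ray. fuel = n+m bounds the steps.
def pvRayA (n m dx dy : Int) : Nat → List (List Int) → Int → Int → List (List Int)
  | 0, G, _, _ => G
  | fuel+1, G, x, y =>
    if 0 ≤ x ∧ x < n ∧ 0 ≤ y ∧ y < m then
      if pvAget G x y = 0 ∨ pvAget G x y = 2 then
        pvRayA n m dx dy fuel (pvAset G x y 2) (x + dx) (y + dy)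
      else G
    else G

-- the body of A's double loop at cell (i,j)
def pvBodyA (n m : Int) (G : List (List Int)) (i j : Int) : List (List Int) :=
  let f := (n + m).toNat
  let v := pvAget G i j
  if v = -1 then
    let G1 := pvRayA n m (-1) (-1) f G (i - 1) (j - 1)
    let G2 := pvRayA n m (-1) 1 f G1 (i - 1) (j + 1)
    let G3 := pvRayA n m 1 (-1) f G2 (i + 1) (j - 1)
    pvRayA n m 1 1 f G3 (i + 1) (j + 1)
  else if v = 1 then
    let G1 := pvRayA n m (-1) 0 f G (i - 1) j
    let G2 := pvRayA n m 1 0 f G1 (i + 1) j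
    let G3 := pvRayA n m 0 (-1) f G2 i (j - 1)
    pvRayA n m 0 1 f G3 i (j + 1)
  else G

def bishops_and_rooks (M : List (List Int)) : Int :=
  let n : Int := M.length
  let m : Int := (M.headD []).length
  let G := (PySem.List.pyRange 0 n 1).foldl
    (fun G i => (PySem.List.pyRange 0 m 1).foldl (fun G j => pvBodyA n m G i j) G) M
  G.foldl (fun acc row => row.foldl (fun a c => a + (if c = 0 then 1 else 0)) acc) 0

-- ===== PORT B =====
-- Source B's `scan`: one sweep along a line with a flag, accumulating attacked coords
def pvScanB (M : List (List Int)) (n m dx dy piece : Int) :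
    Nat → Int → Int → Bool → PySem.Set (Int × Int) → PySem.Set (Int × Int)
  | 0, _, _, _, att => att
  | fuel+1, x, y, flag, att =>
    if 0 ≤ x ∧ x < n ∧ 0 ≤ y ∧ y < m then
      let v := pvAget M x y
      let p : Bool := v == 0 || v == 2
      let att' := if flag && p then att.add (x, y) else att
      pvScanB M n m dx dy piece fuel (x + dx) (y + dy) (v == piece || (flag && p)) att'
    else att

def bishops_and_rooks_alt (M : List (List Int)) : Int :=
  let n : Int := M.length
  let m : Int := (M.headD []).length
  let f := (n + m).toNat
  let att : PySem.Set (Int × Int) := PySem.Set.empty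
  let att := (PySem.List.pyRange 0 n 1).foldl (fun a i =>
    pvScanB M n m 0 (-1) 1 f i (m - 1) false (pvScanB M n m 0 1 1 f i 0 false a)) att
  let att := (PySem.List.pyRange 0 m 1).foldl (fun a j =>
    pvScanB M n m (-1) 0 1 f (n - 1) j false (pvScanB M n m 1 0 1 f 0 j false a)) att
  let att := (PySem.List.pyRange 0 m 1).foldl (fun a j =>
    pvScanB M n m (-1) (-1) (-1) f (n - 1) j false
      (pvScanB M n m (-1) 1 (-1) f (n - 1) j false
        (pvScanB M n m 1 (-1) (-1) f 0 j false
          (pvScanB M n m 1 1 (-1) f 0 j false a)))) att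
  let att := (PySem.List.pyRange 1 (n - 1) 1).foldl (fun a i =>
    pvScanB M n m (-1) (-1) (-1) f i (m - 1) false
      (pvScanB M n m 1 (-1) (-1) f i (m - 1) false
        (pvScanB M n m (-1) 1 (-1) f i 0 false
          (pvScanB M n m 1 1 (-1) f i 0 false a)))) att
  (PySem.List.enumerate M 0).foldl (fun acc p =>
    (PySem.List.enumerate p.2 0).foldl (fun acc q =>
      acc + (if q.2 = 0 ∧ ¬ PySem.Set.contains att (p.1, q.1) = true then 1 else 0)) acc) 0

-- ===== PRECONDITION & SPEC =====
-- Pre_ excludes exactly the inputs on which A raises IndexError: the empty list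
-- (M[0]) and boards where some row is shorter than the first row (M[i][j], j < m).
def Pre_bishops_and_rooks (M : List (List Int)) : Prop :=
  M ≠ [] ∧ ∀ row ∈ M, (M.headD []).length ≤ row.length
instance (M : List (List Int)) : Decidable (Pre_bishops_and_rooks M) := by
  unfold Pre_bishops_and_rooks; infer_instance

def pvWitness_bishops_and_rooks : List (List Int) := [[0, 1, 0], [-1, 0, 0]]

def Spec_bishops_and_rooks (M : List (List Int)) (out : Int) : Prop := out = bishops_and_rooks_alt M
instance (M : List (List Int)) (out : Int) : Decidable (Spec_bishops_and_rooks M out) := by unfold Spec_bishops_and_rooks; infer_instance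

-- ===== CLAIM (what is proved, stated in full; the proofs are below) =====
def Claim_equal_bishops_and_rooks : Prop := ∀ (M : List (List Int)), Dom_bishops_and_rooks M → Pre_bishops_and_rooks M → Spec_bishops_and_rooks M (bishops_and_rooks M)

-- ===== LEMMAS AND PROOFS =====

-- board dimensions as A and B both compute them
def pvN (M : List (List Int)) : Int := M.length
def pvM (M : List (List Int)) : Int := (M.headD []).length

-- cell (x,y) lies on the n×m window
def pvInW (M : List (List Int)) (x y : Int) : Prop :=
  0 ≤ x ∧ x < pvN M ∧ 0 ≤ y ∧ y < pvM M

-- a cell value rays pass through ("not in {0,2}" is A's blocker test)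
def pvPass (v : Int) : Prop := v = 0 ∨ v = 2

-- the 8 ray directions with the piece type that emits them
def pvD8 : List (Int × Int × Int) :=
  [(-1,-1,-1), (-1,1,-1), (1,-1,-1), (1,1,-1), (-1,0,1), (1,0,1), (0,-1,1), (0,1,1)]

-- cell (x,y) is attacked along direction d: some matching piece sits at
-- (x,y) - k·d with every strictly intermediate cell inside the window and passable
def pvAtt (M : List (List Int)) (d : Int × Int × Int) (x y : Int) : Prop :=
  ∃ k : Nat, 1 ≤ k ∧ pvInW M (x - k * d.1) (y - k * d.2.1) ∧
    pvAget M (x - k * d.1) (y - k * d.2.1) = d.2.2 ∧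
    ∀ t : Nat, 1 ≤ t → t < k →
      pvInW M (x - t * d.1) (y - t * d.2.1) ∧ pvPass (pvAget M (x - t * d.1) (y - t * d.2.1))

-- the set of cells A ever marks
def pvSfin (M : List (List Int)) (x y : Int) : Prop :=
  pvInW M x y ∧ pvPass (pvAget M x y) ∧ ∃ d ∈ pvD8, pvAtt M d x y

-- relation: grid G is M with exactly the cells of S overwritten by 2
def pvRel (M G : List (List Int)) (S : Int → Int → Prop) : Prop :=
  G.length = M.length ∧
  (∀ x : Nat, (G.getD x []).length = (M.getD x []).length) ∧
  (∀ x y : Int, S x y → pvInW M x y ∧ pvPass (pvAget M x y)) ∧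
  (∀ x y : Int, S x y → pvAget G x y = 2) ∧
  (∀ x y : Int, 0 ≤ x → 0 ≤ y → ¬ S x y → pvAget G x y = pvAget M x y)

lemma pvRel_congr {M G : List (List Int)} {S S' : Int → Int → Prop}
    (h : ∀ x y, S x y ↔ S' x y) (hr : pvRel M G S) : pvRel M G S' := by
  obtain ⟨h1, h2, h3, h4, h5⟩ := hr
  exact ⟨h1, h2, fun x y hs => h3 x y ((h x y).2 hs), fun x y hs => h4 x y ((h x y).2 hs),
    fun x y hx hy hs => h5 x y hx hy (fun c => hs ((h x y).1 c))⟩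

lemma pvRel_base (M : List (List Int)) : pvRel M M (fun _ _ => False) := by
  refine ⟨rfl, fun _ => rfl, fun x y h => h.elim, fun x y h => h.elim, fun _ _ _ _ _ => rfl⟩

-- the shift step: attacked one step further along d ↔ current cell is the piece,
-- or current cell is passable and itself attacked (needs the current cell in-window)
lemma pvAtt_shift (M : List (List Int)) (d : Int × Int × Int) (x y : Int)
    (hw : pvInW M x y) :
    pvAtt M d (x + d.1) (y + d.2.1) ↔
      (pvAget M x y = d.2.2 ∨ (pvPass (pvAget M x y) ∧ pvAtt M d x y)) := by
  obtain ⟨dx, dy, pc⟩ := d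
  simp only [pvAtt] at *
  constructor
  · rintro ⟨k, hk1, hw', hv, hint⟩
    obtain ⟨k', rfl⟩ : ∃ k', k = k' + 1 := ⟨k - 1, by omega⟩
    have e1 : x + dx - (↑(k' + 1) : ℤ) * dx = x - k' * dx := by push_cast; ring
    have e2 : y + dy - (↑(k' + 1) : ℤ) * dy = y - k' * dy := by push_cast; ring
    rw [e1, e2] at hw' hv
    rcases Nat.eq_zero_or_pos k' with rfl | hk'
    · left; simpa using hv
    · right
      have h1 := hint 1 le_rfl (by omega)
      have e3 : x + dx - (1:ℕ) * dx = x := by push_cast; ring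
      have e4 : y + dy - (1:ℕ) * dy = y := by push_cast; ring
      rw [e3, e4] at h1
      refine ⟨h1.2, k', hk', hw', hv, ?_⟩
      intro t ht1 ht2
      have := hint (t+1) (by omega) (by omega)
      have e5 : x + dx - (↑(t + 1) : ℤ) * dx = x - t * dx := by push_cast; ring
      have e6 : y + dy - (↑(t + 1) : ℤ) * dy = y - t * dy := by push_cast; ring
      rwa [e5, e6] at this
  · rintro (hv | ⟨hp, k', hk', hw', hv, hint⟩)
    · refine ⟨1, le_rfl, ?_, ?_, by omega⟩ <;>
        simp only [Nat.cast_one, one_mul, add_sub_cancel_right] <;> assumption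
    · refine ⟨k' + 1, by omega, ?_, ?_, ?_⟩
      · have e1 : x + dx - (↑(k' + 1) : ℤ) * dx = x - k' * dx := by push_cast; ring
        have e2 : y + dy - (↑(k' + 1) : ℤ) * dy = y - k' * dy := by push_cast; ring
        rw [e1, e2]; exact hw'
      · have e1 : x + dx - (↑(k' + 1) : ℤ) * dx = x - k' * dx := by push_cast; ring
        have e2 : y + dy - (↑(k' + 1) : ℤ) * dy = y - k' * dy := by push_cast; ring
        rw [e1, e2]; exact hv
      · intro t ht1 ht2
        obtain ⟨t', rfl⟩ : ∃ t', t = t' + 1 := ⟨t - 1, by omega⟩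
        have e5 : x + dx - (↑(t' + 1) : ℤ) * dx = x - t' * dx := by push_cast; ring
        have e6 : y + dy - (↑(t' + 1) : ℤ) * dy = y - t' * dy := by push_cast; ring
        rw [e5, e6]
        rcases Nat.eq_zero_or_pos t' with rfl | ht'
        · simpa using ⟨hw, hp⟩
        · exact hint t' ht' (by omega)


-- marking one in-window passable cell extends the relation by that cell
lemma pvGetD_set {α : Type} (l : List α) (i n : Nat) (a d : α) :
    (l.set i a).getD n d = if i = n ∧ i < l.length then a else l.getD n d := by
  simp only [List.getD_eq_getElem?_getD, List.getElem?_set]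
  by_cases h1 : i = n <;> by_cases h2 : i < l.length
  · simp_all
  · subst h1; simp [if_neg h2, List.getElem?_eq_none (Nat.le_of_not_lt h2)]
  · simp_all
  · simp_all

lemma pvRowlen_set (G : List (List Int)) (x y v : Int) (r : Nat) :
    ((pvAset G x y v).getD r []).length = (G.getD r []).length := by
  unfold pvAset
  rw [pvGetD_set]
  split
  · rename_i h; rw [← h.1, List.length_set]
  · rfl

lemma pvAget_set_self (G : List (List Int)) (x y v : Int)
    (hx : x.toNat < G.length) (hy : y.toNat < (G.getD x.toNat []).length) :
    pvAget (pvAset G x y v) x y = v := by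
  unfold pvAget pvAset
  rw [pvGetD_set, if_pos ⟨rfl, hx⟩, pvGetD_set, if_pos ⟨rfl, hy⟩]

lemma pvAget_set_ne (G : List (List Int)) (x y v x' y' : Int)
    (h : x.toNat ≠ x'.toNat ∨ y.toNat ≠ y'.toNat) :
    pvAget (pvAset G x y v) x' y' = pvAget G x' y' := by
  unfold pvAget pvAset
  rw [pvGetD_set]
  split
  · rename_i hc
    rw [← hc.1, pvGetD_set]
    rcases h with h | h
    · exact absurd hc.1 h
    · rw [if_neg (fun c => h c.1)]
  · rfl

lemma pvRel_set (M G : List (List Int)) (S : Int → Int → Prop) (x y : Int)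
    (hP : Pre_bishops_and_rooks M)
    (hr : pvRel M G S) (hw : pvInW M x y) (hp : pvPass (pvAget M x y)) :
    pvRel M (pvAset G x y 2) (fun a b => S a b ∨ (a = x ∧ b = y)) := by
  obtain ⟨h1, h2, h3, h4, h5⟩ := hr
  obtain ⟨hx0, hxn, hy0, hym⟩ := hw
  have hxG : x.toNat < G.length := by
    rw [h1]; unfold pvN at hxn; omega
  have hmem : M.getD x.toNat [] ∈ M := by
    have : x.toNat < M.length := by unfold pvN at hxn; omega
    rw [List.getD_eq_getElem _ _ this]
    exact List.getElem_mem _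
  have hyG : y.toNat < (G.getD x.toNat []).length := by
    rw [h2]
    have := hP.2 _ hmem
    unfold pvM at hym
    omega
  refine ⟨by rw [pvAset, List.length_set]; exact h1, fun r => by rw [pvRowlen_set]; exact h2 r, ?_, ?_, ?_⟩
  · rintro a b (hs | hxy)
    · exact h3 a b hs
    · rw [hxy.1, hxy.2]; exact ⟨⟨hx0, hxn, hy0, hym⟩, hp⟩
  · rintro a b (hs | hxy)
    · obtain ⟨⟨ha0, _, hb0, _⟩, _⟩ := h3 a b hs
      by_cases hc : a = x ∧ b = y
      · rw [hc.1, hc.2]; exact pvAget_set_self G x y 2 hxG hyG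
      · rw [pvAget_set_ne G x y 2 a b (by omega)]; exact h4 a b hs
    · rw [hxy.1, hxy.2]; exact pvAget_set_self G x y 2 hxG hyG
  · intro a b ha hb hs
    have hs1 : ¬ S a b := fun c => hs (Or.inl c)
    have hs2 : ¬ (a = x ∧ b = y) := fun c => hs (Or.inr c)
    rw [pvAget_set_ne G x y 2 a b (by omega)]
    exact h5 a b ha hb hs1


-- cells marked by one ray starting at (x,y): the passable in-window prefix of the ray
def pvRay (M : List (List Int)) (dx dy x y a b : Int) : Prop :=
  ∃ t : Nat, a = x + t * dx ∧ b = y + t * dy ∧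
    ∀ s : Nat, s ≤ t → pvInW M (x + s * dx) (y + s * dy) ∧
      pvPass (pvAget M (x + s * dx) (y + s * dy))

lemma pvRay_nil (M : List (List Int)) (dx dy x y a b : Int)
    (h : ¬ (pvInW M x y ∧ pvPass (pvAget M x y))) : ¬ pvRay M dx dy x y a b := by
  rintro ⟨t, _, _, hc⟩
  have := hc 0 (Nat.zero_le t)
  simp only [Nat.cast_zero, zero_mul, add_zero] at this
  exact h this

lemma pvRay_cons (M : List (List Int)) (dx dy x y a b : Int)
    (hw : pvInW M x y) (hp : pvPass (pvAget M x y)) :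
    pvRay M dx dy x y a b ↔ (a = x ∧ b = y) ∨ pvRay M dx dy (x + dx) (y + dy) a b := by
  constructor
  · rintro ⟨t, ha, hb, hc⟩
    cases t with
    | zero => left; constructor <;> [simpa using ha; simpa using hb]
    | succ t' =>
      right
      refine ⟨t', by push_cast at ha ⊢; linarith, by push_cast at hb ⊢; linarith, ?_⟩
      intro s hs
      have := hc (s+1) (by omega)
      have e1 : x + (↑(s+1) : ℤ) * dx = x + dx + s * dx := by push_cast; ring
      have e2 : y + (↑(s+1) : ℤ) * dy = y + dy + s * dy := by push_cast; ring
      rwa [e1, e2] at this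
  · rintro (⟨rfl, rfl⟩ | ⟨t', ha, hb, hc⟩)
    · exact ⟨0, by simp, by simp, fun s hs => by
        interval_cases s
        simpa using ⟨hw, hp⟩⟩
    · refine ⟨t' + 1, by push_cast at ha ⊢; linarith, by push_cast at hb ⊢; linarith, ?_⟩
      intro s hs
      cases s with
      | zero => simpa using ⟨hw, hp⟩
      | succ s' =>
        have := hc s' (by omega)
        have e1 : x + dx + (↑s' : ℤ) * dx = x + (↑(s'+1) : ℤ) * dx := by push_cast; ring
        have e2 : y + dy + (↑s' : ℤ) * dy = y + (↑(s'+1) : ℤ) * dy := by push_cast; ring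
        rwa [e1, e2] at this

lemma pvRayA_rel (M : List (List Int)) (dx dy : Int) (μ : Int → Int → Int)
    (hP : Pre_bishops_and_rooks M)
    (hpos : ∀ x y, pvInW M x y → 0 < μ x y)
    (hstep : ∀ x y, μ (x + dx) (y + dy) = μ x y - 1) :
    ∀ (fuel : Nat) (G : List (List Int)) (S : Int → Int → Prop) (x y : Int),
      pvRel M G S → μ x y ≤ fuel →
      pvRel M (pvRayA (pvN M) (pvM M) dx dy fuel G x y)
        (fun a b => S a b ∨ pvRay M dx dy x y a b) := by
  intro fuel
  induction fuel with
  | zero =>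
    intro G S x y hr hf
    have hnw : ¬ pvInW M x y := fun hw => by have := hpos x y hw; omega
    exact pvRel_congr (fun a b =>
      (or_iff_left (pvRay_nil M dx dy x y a b (fun c => hnw c.1))).symm) hr
  | succ fuel ih =>
    intro G S x y hr hf
    by_cases hw : pvInW M x y
    · have hcond : (pvAget G x y = 0 ∨ pvAget G x y = 2) ↔ pvPass (pvAget M x y) := by
        by_cases hS : S x y
        · rw [(hr.2.2.2.1) x y hS]
          exact ⟨fun _ => ((hr.2.2.1) x y hS).2, fun _ => Or.inr rfl⟩
        · rw [(hr.2.2.2.2) x y hw.1 hw.2.2.1 hS]; exact Iff.rfl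
      by_cases hp : pvPass (pvAget M x y)
      · have step : pvRayA (pvN M) (pvM M) dx dy (fuel+1) G x y =
            pvRayA (pvN M) (pvM M) dx dy fuel (pvAset G x y 2) (x + dx) (y + dy) := by
          simp only [pvRayA]
          rw [if_pos (by exact hw), if_pos (hcond.2 hp)]
        rw [step]
        have h1 := pvRel_set M G S x y hP hr hw hp
        have h2 := ih (pvAset G x y 2) _ (x + dx) (y + dy) h1
          (by have := hstep x y; omega)
        exact pvRel_congr (fun a b => by
          rw [pvRay_cons M dx dy x y a b hw hp]; tauto) h2
      · have step : pvRayA (pvN M) (pvM M) dx dy (fuel+1) G x y = G := by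
          simp only [pvRayA]
          rw [if_pos (by exact hw), if_neg (fun c => hp (hcond.1 c))]
        rw [step]
        exact pvRel_congr (fun a b =>
          (or_iff_left (pvRay_nil M dx dy x y a b (fun c => hp c.2))).symm) hr
    · have step : pvRayA (pvN M) (pvM M) dx dy (fuel+1) G x y = G := by
        simp only [pvRayA]
        rw [if_neg (by exact hw)]
      rw [step]
      exact pvRel_congr (fun a b =>
        (or_iff_left (pvRay_nil M dx dy x y a b (fun c => hw c.1))).symm) hr

-- cells marked when A's double loop reaches cell (i,j)
def pvContrib (M : List (List Int)) (i j a b : Int) : Prop :=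
  ∃ d ∈ pvD8, d.2.2 = pvAget M i j ∧ pvRay M d.1 d.2.1 (i + d.1) (j + d.2.1) a b

lemma pvContrib_iff (M : List (List Int)) (i j a b : Int) :
    pvContrib M i j a b ↔
      (pvAget M i j = -1 ∧
        (pvRay M (-1) (-1) (i - 1) (j - 1) a b ∨ pvRay M (-1) 1 (i - 1) (j + 1) a b ∨
         pvRay M 1 (-1) (i + 1) (j - 1) a b ∨ pvRay M 1 1 (i + 1) (j + 1) a b)) ∨
      (pvAget M i j = 1 ∧
        (pvRay M (-1) 0 (i - 1) j a b ∨ pvRay M 1 0 (i + 1) j a b ∨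
         pvRay M 0 (-1) i (j - 1) a b ∨ pvRay M 0 1 i (j + 1) a b)) := by
  have e1 : i + (-1 : Int) = i - 1 := by ring
  have e2 : j + (-1 : Int) = j - 1 := by ring
  have e3 : i + (0 : Int) = i := by ring
  have e4 : j + (0 : Int) = j := by ring
  constructor
  · rintro ⟨d, hd, hpc, hray⟩
    simp only [pvD8, List.mem_cons, List.not_mem_nil, or_false] at hd
    rcases hd with rfl|rfl|rfl|rfl|rfl|rfl|rfl|rfl <;>
      simp only [e1, e2, e3, e4] at hray <;> [
        exact Or.inl ⟨hpc.symm, Or.inl hray⟩;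
        exact Or.inl ⟨hpc.symm, Or.inr (Or.inl hray)⟩;
        exact Or.inl ⟨hpc.symm, Or.inr (Or.inr (Or.inl hray))⟩;
        exact Or.inl ⟨hpc.symm, Or.inr (Or.inr (Or.inr hray))⟩;
        exact Or.inr ⟨hpc.symm, Or.inl hray⟩;
        exact Or.inr ⟨hpc.symm, Or.inr (Or.inl hray)⟩;
        exact Or.inr ⟨hpc.symm, Or.inr (Or.inr (Or.inl hray))⟩;
        exact Or.inr ⟨hpc.symm, Or.inr (Or.inr (Or.inr hray))⟩]
  · rintro (⟨hv, hray | hray | hray | hray⟩ | ⟨hv, hray | hray | hray | hray⟩)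
    · exact ⟨(-1,-1,-1), by simp [pvD8], hv.symm, by simpa only [e1, e2]⟩
    · exact ⟨(-1,1,-1), by simp [pvD8], hv.symm, by simpa only [e1, e2]⟩
    · exact ⟨(1,-1,-1), by simp [pvD8], hv.symm, by simpa only [e1, e2]⟩
    · exact ⟨(1,1,-1), by simp [pvD8], hv.symm, by simpa only [e1, e2]⟩
    · exact ⟨(-1,0,1), by simp [pvD8], hv.symm, by simpa only [e1, e4]⟩
    · exact ⟨(1,0,1), by simp [pvD8], hv.symm, by simpa only [e1, e4]⟩
    · exact ⟨(0,-1,1), by simp [pvD8], hv.symm, by simpa only [e2, e3]⟩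
    · exact ⟨(0,1,1), by simp [pvD8], hv.symm, by simpa only [e2, e3]⟩

lemma pvBodyA_rel (M G : List (List Int)) (S : Int → Int → Prop) (i j : Int)
    (hP : Pre_bishops_and_rooks M) (hr : pvRel M G S) (hw : pvInW M i j) :
    pvRel M (pvBodyA (pvN M) (pvM M) G i j)
      (fun a b => S a b ∨ pvContrib M i j a b) := by
  have hn0 : (0:Int) ≤ pvN M := Int.natCast_nonneg _
  have hm0 : (0:Int) ≤ pvM M := Int.natCast_nonneg _
  have hf : ((pvN M + pvM M).toNat : Int) = pvN M + pvM M := by omega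
  obtain ⟨hi0, hin, hj0, hjm⟩ := hw
  by_cases hS : S i j
  · have hv : pvAget G i j = 2 := hr.2.2.2.1 i j hS
    have hvp : pvPass (pvAget M i j) := (hr.2.2.1 i j hS).2
    have step : pvBodyA (pvN M) (pvM M) G i j = G := by
      simp only [pvBodyA, hv]
      norm_num
    rw [step]
    refine pvRel_congr (fun a b => ?_) hr
    constructor
    · exact Or.inl
    · rintro (h | h)
      · exact h
      · rw [pvContrib_iff] at h
        rcases hvp with h2 | h2 <;> rcases h with ⟨h3, _⟩ | ⟨h3, _⟩ <;> rw [h2] at h3 <;> omega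
  · have hv : pvAget G i j = pvAget M i j := hr.2.2.2.2 i j hi0 hj0 hS
    by_cases hb : pvAget M i j = -1
    · have h1 := pvRayA_rel M (-1) (-1) (fun x _ => x + 1) hP
        (fun x y hw => by obtain ⟨a1, _⟩ := hw; beta_reduce; omega) (fun x y => by ring)
        ((pvN M + pvM M).toNat) G S (i-1) (j-1) hr (by beta_reduce; omega)
      have h2 := pvRayA_rel M (-1) 1 (fun x _ => x + 1) hP
        (fun x y hw => by obtain ⟨a1, _⟩ := hw; beta_reduce; omega) (fun x y => by ring)
        ((pvN M + pvM M).toNat) _ _ (i-1) (j+1) h1 (by beta_reduce; omega)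
      have h3 := pvRayA_rel M 1 (-1) (fun x _ => pvN M - x) hP
        (fun x y hw => by obtain ⟨_, a2, _⟩ := hw; beta_reduce; omega) (fun x y => by ring)
        ((pvN M + pvM M).toNat) _ _ (i+1) (j-1) h2 (by beta_reduce; omega)
      have h4 := pvRayA_rel M 1 1 (fun x _ => pvN M - x) hP
        (fun x y hw => by obtain ⟨_, a2, _⟩ := hw; beta_reduce; omega) (fun x y => by ring)
        ((pvN M + pvM M).toNat) _ _ (i+1) (j+1) h3 (by beta_reduce; omega)
      have step : pvBodyA (pvN M) (pvM M) G i j =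
          pvRayA (pvN M) (pvM M) 1 1 ((pvN M + pvM M).toNat)
            (pvRayA (pvN M) (pvM M) 1 (-1) ((pvN M + pvM M).toNat)
              (pvRayA (pvN M) (pvM M) (-1) 1 ((pvN M + pvM M).toNat)
                (pvRayA (pvN M) (pvM M) (-1) (-1) ((pvN M + pvM M).toNat) G (i-1) (j-1))
                (i-1) (j+1)) (i+1) (j-1)) (i+1) (j+1) := by
        simp only [pvBodyA, hv, hb]
        norm_num
      rw [step]
      refine pvRel_congr (fun a b => ?_) h4
      rw [pvContrib_iff]
      have : ¬ pvAget M i j = 1 := by omega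
      tauto
    · by_cases hk : pvAget M i j = 1
      · have h1 := pvRayA_rel M (-1) 0 (fun x _ => x + 1) hP
          (fun x y hw => by obtain ⟨a1, _⟩ := hw; beta_reduce; omega) (fun x y => by ring)
          ((pvN M + pvM M).toNat) G S (i-1) j hr (by beta_reduce; omega)
        have h2 := pvRayA_rel M 1 0 (fun x _ => pvN M - x) hP
          (fun x y hw => by obtain ⟨_, a2, _⟩ := hw; beta_reduce; omega) (fun x y => by ring)
          ((pvN M + pvM M).toNat) _ _ (i+1) j h1 (by beta_reduce; omega)
        have h3 := pvRayA_rel M 0 (-1) (fun _ y => y + 1) hP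
          (fun x y hw => by obtain ⟨_, _, a3, _⟩ := hw; beta_reduce; omega) (fun x y => by ring)
          ((pvN M + pvM M).toNat) _ _ i (j-1) h2 (by beta_reduce; omega)
        have h4 := pvRayA_rel M 0 1 (fun _ y => pvM M - y) hP
          (fun x y hw => by obtain ⟨_, _, _, a4⟩ := hw; beta_reduce; omega) (fun x y => by ring)
          ((pvN M + pvM M).toNat) _ _ i (j+1) h3 (by beta_reduce; omega)
        have step : pvBodyA (pvN M) (pvM M) G i j =
            pvRayA (pvN M) (pvM M) 0 1 ((pvN M + pvM M).toNat)
              (pvRayA (pvN M) (pvM M) 0 (-1) ((pvN M + pvM M).toNat)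
                (pvRayA (pvN M) (pvM M) 1 0 ((pvN M + pvM M).toNat)
                  (pvRayA (pvN M) (pvM M) (-1) 0 ((pvN M + pvM M).toNat) G (i-1) j)
                  (i+1) j) i (j-1)) i (j+1) := by
          simp only [pvBodyA, hv, hk]
          norm_num
        rw [step]
        refine pvRel_congr (fun a b => ?_) h4
        rw [pvContrib_iff]
        tauto
      · have step : pvBodyA (pvN M) (pvM M) G i j = G := by
          simp only [pvBodyA, hv, hb, hk]
          norm_num
        rw [step]
        refine pvRel_congr (fun a b => ?_) hr
        rw [pvContrib_iff]
        tauto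

lemma pvFoldl_rel {α : Type} (M : List (List Int)) (xs : List α)
    (F : List (List Int) → α → List (List Int)) (A : α → Int → Int → Prop)
    (h : ∀ G S x, x ∈ xs → pvRel M G S → pvRel M (F G x) (fun a b => S a b ∨ A x a b)) :
    ∀ (G : List (List Int)) (S : Int → Int → Prop), pvRel M G S →
      pvRel M (xs.foldl F G) (fun a b => S a b ∨ ∃ x ∈ xs, A x a b) := by
  induction xs with
  | nil => intro G S hr; exact pvRel_congr (by simp) hr
  | cons z zs ih =>
    intro G S hr
    have h1 := h G S z (by simp) hr
    have h2 := ih (fun G S x hx => h G S x (by simp [hx])) _ _ h1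
    exact pvRel_congr (by intro a b; simp; tauto) h2

lemma pvSfin_iff (M : List (List Int)) (a b : Int) :
    (∃ i ∈ PySem.List.pyRange 0 (pvN M) 1, ∃ j ∈ PySem.List.pyRange 0 (pvM M) 1,
      pvContrib M i j a b) ↔ pvSfin M a b := by
  constructor
  · rintro ⟨i, hi, j, hj, d, hd, hpc, t, ha, hb, hall⟩
    rw [PySem.List.mem_pyRange_one] at hi hj
    obtain ⟨dx, dy, pc⟩ := d
    simp only at hpc ha hb hall ⊢
    have hcell := hall t le_rfl
    have ea : i + dx + (t:ℤ) * dx = a := ha.symm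
    have eb : j + dy + (t:ℤ) * dy = b := hb.symm
    rw [ea, eb] at hcell
    refine ⟨hcell.1, hcell.2, (dx, dy, pc), hd, t + 1, by omega, ?_, ?_, ?_⟩
    · have e1 : a - (↑(t+1) : ℤ) * dx = i := by rw [ha]; push_cast; ring
      have e2 : b - (↑(t+1) : ℤ) * dy = j := by rw [hb]; push_cast; ring
      rw [e1, e2]
      exact ⟨hi.1, hi.2, hj.1, hj.2⟩
    · have e1 : a - (↑(t+1) : ℤ) * dx = i := by rw [ha]; push_cast; ring
      have e2 : b - (↑(t+1) : ℤ) * dy = j := by rw [hb]; push_cast; ring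
      rw [e1, e2]
      exact hpc.symm
    · intro t' ht1 ht2
      have hs := hall (t - t') (by omega)
      have e1 : i + dx + (↑(t - t') : ℤ) * dx = a - t' * dx := by
        have hc : ((t - t' : ℕ) : ℤ) = (t:ℤ) - t' := by omega
        rw [hc, ha]; ring
      have e2 : j + dy + (↑(t - t') : ℤ) * dy = b - t' * dy := by
        have hc : ((t - t' : ℕ) : ℤ) = (t:ℤ) - t' := by omega
        rw [hc, hb]; ring
      rwa [e1, e2] at hs
  · rintro ⟨hw, hp, d, hd, k, hk1, hw', hv, hint⟩
    obtain ⟨dx, dy, pc⟩ := d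
    simp only at hw' hv hint ⊢
    refine ⟨a - k * dx, ?_, b - k * dy, ?_, (dx, dy, pc), hd, hv.symm, k - 1, ?_, ?_, ?_⟩
    · rw [PySem.List.mem_pyRange_one]; exact ⟨hw'.1, hw'.2.1⟩
    · rw [PySem.List.mem_pyRange_one]; exact ⟨hw'.2.2.1, hw'.2.2.2⟩
    · have hc : ((k - 1 : ℕ) : ℤ) = (k:ℤ) - 1 := by omega
      rw [hc]; ring
    · have hc : ((k - 1 : ℕ) : ℤ) = (k:ℤ) - 1 := by omega
      rw [hc]; ring
    · intro s hs
      have e1 : a - k * dx + dx + (s:ℤ) * dx = a - (↑(k - 1 - s) : ℤ) * dx := by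
        have : ((k - 1 - s : ℕ) : ℤ) = (k:ℤ) - 1 - s := by omega
        rw [this]; ring
      have e2 : b - k * dy + dy + (s:ℤ) * dy = b - (↑(k - 1 - s) : ℤ) * dy := by
        have : ((k - 1 - s : ℕ) : ℤ) = (k:ℤ) - 1 - s := by omega
        rw [this]; ring
      show pvInW M (a - ↑k * dx + dx + ↑s * dx) (b - ↑k * dy + dy + ↑s * dy) ∧ _
      rw [e1, e2]
      rcases Nat.eq_zero_or_pos (k - 1 - s) with hz | hpos
      · rw [hz]; simpa using ⟨hw, hp⟩
      · exact hint (k - 1 - s) hpos (by omega)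

-- A's double loop yields the full marked-cell relation
lemma pvRel_final (M : List (List Int)) (hP : Pre_bishops_and_rooks M) :
    pvRel M ((PySem.List.pyRange 0 (pvN M) 1).foldl
      (fun G i => (PySem.List.pyRange 0 (pvM M) 1).foldl
        (fun G j => pvBodyA (pvN M) (pvM M) G i j) G) M) (pvSfin M) := by
  have h := pvFoldl_rel M (PySem.List.pyRange 0 (pvN M) 1)
    (fun G i => (PySem.List.pyRange 0 (pvM M) 1).foldl
      (fun G j => pvBodyA (pvN M) (pvM M) G i j) G)
    (fun i a b => ∃ j ∈ PySem.List.pyRange 0 (pvM M) 1, pvContrib M i j a b)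
    (fun G S i hi hr => pvFoldl_rel M (PySem.List.pyRange 0 (pvM M) 1)
      (fun G j => pvBodyA (pvN M) (pvM M) G i j)
      (fun j a b => pvContrib M i j a b)
      (fun G S j hj hr => pvBodyA_rel M G S i j hP hr (by
        rw [PySem.List.mem_pyRange_one] at hi hj
        exact ⟨hi.1, hi.2, hj.1, hj.2⟩)) G S hr)
    M (fun _ _ => False) (pvRel_base M)
  exact pvRel_congr (fun a b => by rw [← pvSfin_iff M a b]; tauto) h

-- ===== B side =====

-- cells the scan starting at (x,y) visits: ray cells up to leaving the window
def pvVisited (M : List (List Int)) (dx dy x y a b : Int) : Prop :=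
  ∃ t : Nat, a = x + t * dx ∧ b = y + t * dy ∧
    ∀ s : Nat, s ≤ t → pvInW M (x + s * dx) (y + s * dy)

lemma pvVisited_nil (M : List (List Int)) (dx dy x y a b : Int)
    (h : ¬ pvInW M x y) : ¬ pvVisited M dx dy x y a b := by
  rintro ⟨t, _, _, hc⟩
  have := hc 0 (Nat.zero_le t)
  simp only [Nat.cast_zero, zero_mul, add_zero] at this
  exact h this

lemma pvVisited_cons (M : List (List Int)) (dx dy x y a b : Int)
    (hw : pvInW M x y) :
    pvVisited M dx dy x y a b ↔ (a = x ∧ b = y) ∨ pvVisited M dx dy (x + dx) (y + dy) a b := by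
  constructor
  · rintro ⟨t, ha, hb, hc⟩
    cases t with
    | zero => left; constructor <;> [simpa using ha; simpa using hb]
    | succ t' =>
      right
      refine ⟨t', by push_cast at ha ⊢; linarith, by push_cast at hb ⊢; linarith, ?_⟩
      intro s hs
      have := hc (s+1) (by omega)
      have e1 : x + (↑(s+1) : ℤ) * dx = x + dx + s * dx := by push_cast; ring
      have e2 : y + (↑(s+1) : ℤ) * dy = y + dy + s * dy := by push_cast; ring
      rwa [e1, e2] at this
  · rintro (⟨rfl, rfl⟩ | ⟨t', ha, hb, hc⟩)
    · exact ⟨0, by simp, by simp, fun s hs => by interval_cases s; simpa using hw⟩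
    · refine ⟨t' + 1, by push_cast at ha ⊢; linarith, by push_cast at hb ⊢; linarith, ?_⟩
      intro s hs
      cases s with
      | zero => simpa using hw
      | succ s' =>
        have := hc s' (by omega)
        have e1 : x + dx + (↑s' : ℤ) * dx = x + (↑(s'+1) : ℤ) * dx := by push_cast; ring
        have e2 : y + dy + (↑s' : ℤ) * dy = y + (↑(s'+1) : ℤ) * dy := by push_cast; ring
        rwa [e1, e2] at this

lemma pvScanB_char (M : List (List Int)) (dx dy pc : Int) (μ : Int → Int → Int)
    (hpos : ∀ x y, pvInW M x y → 0 < μ x y)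
    (hstep : ∀ x y, μ (x + dx) (y + dy) = μ x y - 1) :
    ∀ (fuel : Nat) (x y : Int) (flag : Bool) (att : PySem.Set (Int × Int)),
      (flag = true ↔ pvAtt M (dx, dy, pc) x y) → μ x y ≤ fuel →
      ∀ c : Int × Int,
        c ∈ pvScanB M (pvN M) (pvM M) dx dy pc fuel x y flag att ↔
          c ∈ att ∨ (pvVisited M dx dy x y c.1 c.2 ∧ pvAtt M (dx, dy, pc) c.1 c.2 ∧
            pvPass (pvAget M c.1 c.2)) := by
  intro fuel
  induction fuel with
  | zero =>
    intro x y flag att hflag hf c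
    have hnw : ¬ pvInW M x y := fun hw => by have := hpos x y hw; omega
    simp only [pvScanB]
    exact (or_iff_left (fun h => pvVisited_nil M dx dy x y c.1 c.2 hnw h.1)).symm
  | succ fuel ih =>
    intro x y flag att hflag hf c
    by_cases hw : pvInW M x y
    · have hpass : (pvAget M x y == 0 || pvAget M x y == 2) = true ↔ pvPass (pvAget M x y) := by
        show (pvAget M x y == 0 || pvAget M x y == 2) = true ↔ _
        simp [pvPass]
      have hflag' : (pvAget M x y == pc || (flag && (pvAget M x y == 0 || pvAget M x y == 2))) = true ↔
          pvAtt M (dx, dy, pc) (x + dx) (y + dy) := by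
        rw [pvAtt_shift M (dx, dy, pc) x y hw]
        show (pvAget M x y == pc || _) = true ↔ _
        simp only [Bool.or_eq_true, Bool.and_eq_true, beq_iff_eq, hpass, hflag]
        tauto
      have step : pvScanB M (pvN M) (pvM M) dx dy pc (fuel+1) x y flag att =
          pvScanB M (pvN M) (pvM M) dx dy pc fuel (x + dx) (y + dy)
            (pvAget M x y == pc || (flag && (pvAget M x y == 0 || pvAget M x y == 2)))
            (if flag && (pvAget M x y == 0 || pvAget M x y == 2) then PySem.Set.add att (x, y) else att) := by
        simp only [pvScanB]
        rw [if_pos (by exact hw)]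
      rw [step]
      rw [ih (x + dx) (y + dy) _ _ hflag' (by have := hstep x y; omega) c]
      have hmem : c ∈ (if flag && (pvAget M x y == 0 || pvAget M x y == 2) then PySem.Set.add att (x, y) else att) ↔
          c ∈ att ∨ (flag = true ∧ pvPass (pvAget M x y) ∧ c = (x, y)) := by
        split
        · rename_i hc
          rw [PySem.Set.mem_add]
          simp only [Bool.and_eq_true] at hc
          have := hpass.1 hc.2
          tauto
        · rename_i hc
          simp only [Bool.and_eq_true, not_and_or] at hc
          constructor
          · exact Or.inl
          · rintro (h | ⟨h1, h2, h3⟩)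
            · exact h
            · rcases hc with hc | hc
              · exact absurd h1 hc
              · exact absurd (hpass.2 h2) hc
      rw [hmem]
      have hvis := pvVisited_cons M dx dy x y c.1 c.2 hw
      constructor
      · rintro (((h | ⟨h1, h2, h3⟩) | ⟨h1, h2, h3⟩))
        · exact Or.inl h
        · refine Or.inr ⟨?_, ?_, ?_⟩
          · rw [hvis]; left; rw [h3]; exact ⟨rfl, rfl⟩
          · rw [h3]; exact hflag.1 h1
          · rw [h3]; exact h2
        · exact Or.inr ⟨hvis.2 (Or.inr h1), h2, h3⟩
      · rintro (h | ⟨h1, h2, h3⟩)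
        · exact Or.inl (Or.inl h)
        · rcases hvis.1 h1 with ⟨e1, e2⟩ | hv
          · left; right
            refine ⟨hflag.2 ?_, ?_, ?_⟩
            · rw [← e1, ← e2]; exact h2
            · rw [← e1, ← e2]; exact h3
            · cases c; simp only at e1 e2; rw [e1, e2]
          · exact Or.inr ⟨hv, h2, h3⟩
    · have step : pvScanB M (pvN M) (pvM M) dx dy pc (fuel+1) x y flag att = att := by
        simp only [pvScanB]
        rw [if_neg (by exact hw)]
      rw [step]
      exact (or_iff_left (fun h => pvVisited_nil M dx dy x y c.1 c.2 hw h.1)).symm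

lemma pvFoldl_mem {α : Type} (xs : List α)
    (F : PySem.Set (Int × Int) → α → PySem.Set (Int × Int))
    (Add : α → (Int × Int) → Prop)
    (h : ∀ a x, x ∈ xs → ∀ c : Int × Int, c ∈ F a x ↔ c ∈ a ∨ Add x c) :
    ∀ (a : PySem.Set (Int × Int)) (c : Int × Int),
      c ∈ xs.foldl F a ↔ c ∈ a ∨ ∃ x ∈ xs, Add x c := by
  induction xs with
  | nil => intro a c; simp
  | cons z zs ih =>
    intro a c
    rw [List.foldl_cons, ih (fun a x hx => h a x (by simp [hx])), h a z (by simp)]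
    simp; tauto

-- B's attacked set, as bishops_and_rooks_alt builds it
def pvAttB (M : List (List Int)) : PySem.Set (Int × Int) :=
  let n : Int := M.length
  let m : Int := (M.headD []).length
  let f := (n + m).toNat
  let att : PySem.Set (Int × Int) := PySem.Set.empty
  let att := (PySem.List.pyRange 0 n 1).foldl (fun a i =>
    pvScanB M n m 0 (-1) 1 f i (m - 1) false (pvScanB M n m 0 1 1 f i 0 false a)) att
  let att := (PySem.List.pyRange 0 m 1).foldl (fun a j =>
    pvScanB M n m (-1) 0 1 f (n - 1) j false (pvScanB M n m 1 0 1 f 0 j false a)) att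
  let att := (PySem.List.pyRange 0 m 1).foldl (fun a j =>
    pvScanB M n m (-1) (-1) (-1) f (n - 1) j false
      (pvScanB M n m (-1) 1 (-1) f (n - 1) j false
        (pvScanB M n m 1 (-1) (-1) f 0 j false
          (pvScanB M n m 1 1 (-1) f 0 j false a)))) att
  (PySem.List.pyRange 1 (n - 1) 1).foldl (fun a i =>
    pvScanB M n m (-1) (-1) (-1) f i (m - 1) false
      (pvScanB M n m 1 (-1) (-1) f i (m - 1) false
        (pvScanB M n m (-1) 1 (-1) f i 0 false
          (pvScanB M n m 1 1 (-1) f i 0 false a)))) att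

-- one scan's contribution: visited cell, attacked along d, passable
def pvHit (M : List (List Int)) (dx dy pc sx sy : Int) (c : Int × Int) : Prop :=
  pvVisited M dx dy sx sy c.1 c.2 ∧ pvAtt M (dx, dy, pc) c.1 c.2 ∧ pvPass (pvAget M c.1 c.2)

lemma pvScan_dx1 (M : List (List Int)) (dy pc sx sy : Int)
    (hs : ¬ pvAtt M (1, dy, pc) sx sy) (hb : pvN M - sx ≤ ((pvN M + pvM M).toNat : Int))
    (att : PySem.Set (Int × Int)) (c : Int × Int) :
    c ∈ pvScanB M (pvN M) (pvM M) 1 dy pc ((pvN M + pvM M).toNat) sx sy false att ↔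
      c ∈ att ∨ pvHit M 1 dy pc sx sy c :=
  pvScanB_char M 1 dy pc (fun x _ => pvN M - x)
    (fun x y hw => by obtain ⟨w1, w2, w3, w4⟩ := hw; beta_reduce; omega) (fun x y => by beta_reduce; ring)
    ((pvN M + pvM M).toNat) sx sy false att (by simpa using hs) hb c

lemma pvScan_dxm1 (M : List (List Int)) (dy pc sx sy : Int)
    (hs : ¬ pvAtt M (-1, dy, pc) sx sy) (hb : sx + 1 ≤ ((pvN M + pvM M).toNat : Int))
    (att : PySem.Set (Int × Int)) (c : Int × Int) :
    c ∈ pvScanB M (pvN M) (pvM M) (-1) dy pc ((pvN M + pvM M).toNat) sx sy false att ↔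
      c ∈ att ∨ pvHit M (-1) dy pc sx sy c :=
  pvScanB_char M (-1) dy pc (fun x _ => x + 1)
    (fun x y hw => by obtain ⟨w1, w2, w3, w4⟩ := hw; beta_reduce; omega) (fun x y => by beta_reduce; ring)
    ((pvN M + pvM M).toNat) sx sy false att (by simpa using hs) hb c

lemma pvScan_dy1 (M : List (List Int)) (pc sx sy : Int)
    (hs : ¬ pvAtt M (0, 1, pc) sx sy) (hb : pvM M - sy ≤ ((pvN M + pvM M).toNat : Int))
    (att : PySem.Set (Int × Int)) (c : Int × Int) :
    c ∈ pvScanB M (pvN M) (pvM M) 0 1 pc ((pvN M + pvM M).toNat) sx sy false att ↔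
      c ∈ att ∨ pvHit M 0 1 pc sx sy c :=
  pvScanB_char M 0 1 pc (fun _ y => pvM M - y)
    (fun x y hw => by obtain ⟨w1, w2, w3, w4⟩ := hw; beta_reduce; omega) (fun x y => by beta_reduce; ring)
    ((pvN M + pvM M).toNat) sx sy false att (by simpa using hs) hb c

lemma pvScan_dym1 (M : List (List Int)) (pc sx sy : Int)
    (hs : ¬ pvAtt M (0, -1, pc) sx sy) (hb : sy + 1 ≤ ((pvN M + pvM M).toNat : Int))
    (att : PySem.Set (Int × Int)) (c : Int × Int) :
    c ∈ pvScanB M (pvN M) (pvM M) 0 (-1) pc ((pvN M + pvM M).toNat) sx sy false att ↔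
      c ∈ att ∨ pvHit M 0 (-1) pc sx sy c :=
  pvScanB_char M 0 (-1) pc (fun _ y => y + 1)
    (fun x y hw => by obtain ⟨w1, w2, w3, w4⟩ := hw; beta_reduce; omega) (fun x y => by beta_reduce; ring)
    ((pvN M + pvM M).toNat) sx sy false att (by simpa using hs) hb c

-- no cell is attacked from beyond the board edge the scan starts on
lemma pvNoAtt_dx1 (M : List (List Int)) (dy pc x y : Int) (hx : x ≤ 0) :
    ¬ pvAtt M (1, dy, pc) x y := by
  rintro ⟨k, hk, ⟨h1, _⟩, _⟩
  simp only [mul_one] at h1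
  omega

lemma pvNoAtt_dxm1 (M : List (List Int)) (dy pc x y : Int) (hx : pvN M - 1 ≤ x) :
    ¬ pvAtt M (-1, dy, pc) x y := by
  rintro ⟨k, hk, ⟨_, h2, _⟩, _⟩
  simp only [mul_neg_one] at h2
  omega

lemma pvNoAtt_dy1 (M : List (List Int)) (dx pc x y : Int) (hy : y ≤ 0) :
    ¬ pvAtt M (dx, 1, pc) x y := by
  rintro ⟨k, hk, ⟨_, _, h3, _⟩, _⟩
  simp only [mul_one] at h3
  omega

lemma pvNoAtt_dym1 (M : List (List Int)) (dx pc x y : Int) (hy : pvM M - 1 ≤ y) :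
    ¬ pvAtt M (dx, -1, pc) x y := by
  rintro ⟨k, hk, ⟨_, _, _, h4⟩, _⟩
  simp only [mul_neg_one] at h4
  omega

lemma pvN_def (M : List (List Int)) : (M.length : Int) = pvN M := rfl
lemma pvM_def (M : List (List Int)) : ((M.headD []).length : Int) = pvM M := rfl

lemma pvAttB_mem (M : List (List Int)) (c : Int × Int) :
    c ∈ pvAttB M ↔
      ((∃ i ∈ PySem.List.pyRange 0 (pvN M) 1,
          pvHit M 0 1 1 i 0 c ∨ pvHit M 0 (-1) 1 i (pvM M - 1) c) ∨
       (∃ j ∈ PySem.List.pyRange 0 (pvM M) 1,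
          pvHit M 1 0 1 0 j c ∨ pvHit M (-1) 0 1 (pvN M - 1) j c) ∨
       (∃ j ∈ PySem.List.pyRange 0 (pvM M) 1,
          pvHit M 1 1 (-1) 0 j c ∨ pvHit M 1 (-1) (-1) 0 j c ∨
          pvHit M (-1) 1 (-1) (pvN M - 1) j c ∨ pvHit M (-1) (-1) (-1) (pvN M - 1) j c) ∨
       (∃ i ∈ PySem.List.pyRange 1 (pvN M - 1) 1,
          pvHit M 1 1 (-1) i 0 c ∨ pvHit M (-1) 1 (-1) i 0 c ∨
          pvHit M 1 (-1) (-1) i (pvM M - 1) c ∨ pvHit M (-1) (-1) (-1) i (pvM M - 1) c)) := by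
  have hn0 : (0:Int) ≤ pvN M := Int.natCast_nonneg _
  have hm0 : (0:Int) ≤ pvM M := Int.natCast_nonneg _
  have hf : ((pvN M + pvM M).toNat : Int) = pvN M + pvM M := by omega
  show c ∈ (PySem.List.pyRange 1 (pvN M - 1) 1).foldl _ _ ↔ _
  rw [pvFoldl_mem _ _ (fun i c =>
      pvHit M 1 1 (-1) i 0 c ∨ pvHit M (-1) 1 (-1) i 0 c ∨
      pvHit M 1 (-1) (-1) i (pvM M - 1) c ∨ pvHit M (-1) (-1) (-1) i (pvM M - 1) c)
    (fun a i hi c => by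
      rw [PySem.List.mem_pyRange_one] at hi
      simp only [pvN_def, pvM_def]
      rw [pvScan_dxm1 M (-1) (-1) i (pvM M - 1) (pvNoAtt_dym1 M _ _ _ _ (by omega)) (by omega),
          pvScan_dx1 M (-1) (-1) i (pvM M - 1) (pvNoAtt_dym1 M _ _ _ _ (by omega)) (by omega),
          pvScan_dxm1 M 1 (-1) i 0 (pvNoAtt_dy1 M _ _ _ _ (by omega)) (by omega),
          pvScan_dx1 M 1 (-1) i 0 (pvNoAtt_dy1 M _ _ _ _ (by omega)) (by omega)]
      tauto)]
  rw [pvFoldl_mem _ _ (fun j c =>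
      pvHit M 1 1 (-1) 0 j c ∨ pvHit M 1 (-1) (-1) 0 j c ∨
      pvHit M (-1) 1 (-1) (pvN M - 1) j c ∨ pvHit M (-1) (-1) (-1) (pvN M - 1) j c)
    (fun a j hj c => by
      rw [PySem.List.mem_pyRange_one] at hj
      simp only [pvN_def, pvM_def]
      rw [pvScan_dxm1 M (-1) (-1) (pvN M - 1) j (pvNoAtt_dxm1 M _ _ _ _ (by omega)) (by omega),
          pvScan_dxm1 M 1 (-1) (pvN M - 1) j (pvNoAtt_dxm1 M _ _ _ _ (by omega)) (by omega),
          pvScan_dx1 M (-1) (-1) 0 j (pvNoAtt_dx1 M _ _ _ _ (by omega)) (by omega),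
          pvScan_dx1 M 1 (-1) 0 j (pvNoAtt_dx1 M _ _ _ _ (by omega)) (by omega)]
      tauto)]
  rw [pvFoldl_mem _ _ (fun j c =>
      pvHit M 1 0 1 0 j c ∨ pvHit M (-1) 0 1 (pvN M - 1) j c)
    (fun a j hj c => by
      rw [PySem.List.mem_pyRange_one] at hj
      simp only [pvN_def, pvM_def]
      rw [pvScan_dxm1 M 0 1 (pvN M - 1) j (pvNoAtt_dxm1 M _ _ _ _ (by omega)) (by omega),
          pvScan_dx1 M 0 1 0 j (pvNoAtt_dx1 M _ _ _ _ (by omega)) (by omega)]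
      tauto)]
  rw [pvFoldl_mem _ _ (fun i c =>
      pvHit M 0 1 1 i 0 c ∨ pvHit M 0 (-1) 1 i (pvM M - 1) c)
    (fun a i hi c => by
      rw [PySem.List.mem_pyRange_one] at hi
      simp only [pvN_def, pvM_def]
      rw [pvScan_dym1 M 1 i (pvM M - 1) (pvNoAtt_dym1 M _ _ _ _ (by omega)) (by omega),
          pvScan_dy1 M 1 i 0 (pvNoAtt_dy1 M _ _ _ _ (by omega)) (by omega)]
      tauto)]
  simp only [pvN_def, pvM_def, PySem.Set.empty, List.not_mem_nil, false_or, or_assoc]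

lemma pvHit_sfin (M : List (List Int)) (dx dy pc sx sy : Int) (c : Int × Int)
    (hd : (dx, dy, pc) ∈ pvD8) (h : pvHit M dx dy pc sx sy c) : pvSfin M c.1 c.2 := by
  obtain ⟨⟨t, ha, hb, hall⟩, hatt, hpass⟩ := h
  have hc := hall t le_rfl
  rw [← ha, ← hb] at hc
  exact ⟨hc, hpass, (dx, dy, pc), hd, hatt⟩

lemma pvAttB_char (M : List (List Int)) (c : Int × Int) :
    c ∈ pvAttB M ↔ pvSfin M c.1 c.2 := by
  constructor
  · intro h
    rw [pvAttB_mem] at h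
    rcases h with ⟨i, hi, h | h⟩ | ⟨j, hj, h | h⟩ | ⟨j, hj, h | h | h | h⟩ | ⟨i, hi, h | h | h | h⟩ <;>
      exact pvHit_sfin M _ _ _ _ _ c (by simp [pvD8]) h
  · rintro ⟨hw, hp, d, hd, hatt⟩
    obtain ⟨c1, c2⟩ := c
    rw [pvAttB_mem]
    simp only [pvD8, List.mem_cons, List.not_mem_nil, or_false] at hd
    obtain ⟨hx0, hxn, hy0, hym⟩ := hw
    simp only at hp hatt hx0 hxn hy0 hym
    have hcopy := hatt
    rcases hd with rfl|rfl|rfl|rfl|rfl|rfl|rfl|rfl <;>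
      obtain ⟨k, hk1, hw', -⟩ := hcopy <;>
      simp only [pvInW] at hw'
    -- d = (-1,-1,-1): piece below-right; bottom edge or right edge start
    · by_cases hc : c2 + (pvN M - 1 - c1) ≤ pvM M - 1
      · refine Or.inr (Or.inr (Or.inl ⟨c2 + (pvN M - 1) - c1,
          by rw [PySem.List.mem_pyRange_one]; omega,
          Or.inr (Or.inr (Or.inr ⟨⟨(pvN M - 1 - c1).toNat, by omega, by omega, ?_⟩, hatt, hp⟩))⟩))
        intro s hs; simp only [pvInW]; omega
      · refine Or.inr (Or.inr (Or.inr ⟨c1 + (pvM M - 1) - c2,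
          by rw [PySem.List.mem_pyRange_one]; omega,
          Or.inr (Or.inr (Or.inr ⟨⟨(pvM M - 1 - c2).toNat, by omega, by omega, ?_⟩, hatt, hp⟩))⟩))
        intro s hs; simp only [pvInW]; omega
    -- d = (-1,1,-1): piece below-left; bottom edge or left edge start
    · by_cases hc : 0 ≤ c2 - (pvN M - 1 - c1)
      · refine Or.inr (Or.inr (Or.inl ⟨c2 - (pvN M - 1) + c1,
          by rw [PySem.List.mem_pyRange_one]; omega,
          Or.inr (Or.inr (Or.inl ⟨⟨(pvN M - 1 - c1).toNat, by omega, by omega, ?_⟩, hatt, hp⟩))⟩))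
        intro s hs; simp only [pvInW]; omega
      · refine Or.inr (Or.inr (Or.inr ⟨c1 + c2,
          by rw [PySem.List.mem_pyRange_one]; omega,
          Or.inr (Or.inl ⟨⟨c2.toNat, by omega, by omega, ?_⟩, hatt, hp⟩)⟩))
        intro s hs; simp only [pvInW]; omega
    -- d = (1,-1,-1): piece above-right; top edge or right edge start
    · by_cases hc : c1 + c2 ≤ pvM M - 1
      · refine Or.inr (Or.inr (Or.inl ⟨c1 + c2,
          by rw [PySem.List.mem_pyRange_one]; omega,
          Or.inr (Or.inl ⟨⟨c1.toNat, by omega, by omega, ?_⟩, hatt, hp⟩)⟩))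
        intro s hs; simp only [pvInW]; omega
      · refine Or.inr (Or.inr (Or.inr ⟨c1 + c2 - (pvM M - 1),
          by rw [PySem.List.mem_pyRange_one]; omega,
          Or.inr (Or.inr (Or.inl ⟨⟨(pvM M - 1 - c2).toNat, by omega, by omega, ?_⟩, hatt, hp⟩))⟩))
        intro s hs; simp only [pvInW]; omega
    -- d = (1,1,-1): piece above-left; top edge or left edge start
    · by_cases hc : c1 ≤ c2
      · refine Or.inr (Or.inr (Or.inl ⟨c2 - c1,
          by rw [PySem.List.mem_pyRange_one]; omega,
          Or.inl ⟨⟨c1.toNat, by omega, by omega, ?_⟩, hatt, hp⟩⟩))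
        intro s hs; simp only [pvInW]; omega
      · refine Or.inr (Or.inr (Or.inr ⟨c1 - c2,
          by rw [PySem.List.mem_pyRange_one]; omega,
          Or.inl ⟨⟨c2.toNat, by omega, by omega, ?_⟩, hatt, hp⟩⟩))
        intro s hs; simp only [pvInW]; omega
    -- d = (-1,0,1): rook below
    · refine Or.inr (Or.inl ⟨c2, by rw [PySem.List.mem_pyRange_one]; omega,
        Or.inr ⟨⟨(pvN M - 1 - c1).toNat, by omega, by omega, ?_⟩, hatt, hp⟩⟩)
      intro s hs; simp only [pvInW]; omega
    -- d = (1,0,1): rook above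
    · refine Or.inr (Or.inl ⟨c2, by rw [PySem.List.mem_pyRange_one]; omega,
        Or.inl ⟨⟨c1.toNat, by omega, by omega, ?_⟩, hatt, hp⟩⟩)
      intro s hs; simp only [pvInW]; omega
    -- d = (0,-1,1): rook to the right
    · refine Or.inl ⟨c1, by rw [PySem.List.mem_pyRange_one]; omega,
        Or.inr ⟨⟨(pvM M - 1 - c2).toNat, by omega, by omega, ?_⟩, hatt, hp⟩⟩
      intro s hs; simp only [pvInW]; omega
    -- d = (0,1,1): rook to the left
    · refine Or.inl ⟨c1, by rw [PySem.List.mem_pyRange_one]; omega,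
        Or.inl ⟨⟨c2.toNat, by omega, by omega, ?_⟩, hatt, hp⟩⟩
      intro s hs; simp only [pvInW]; omega

lemma pvAlt_eq_count (M : List (List Int)) :
    bishops_and_rooks_alt M =
      ((PySem.List.enumerate M 0).map (fun p =>
        ((PySem.List.enumerate p.2 0).map (fun q =>
          if q.2 = 0 ∧ ¬ PySem.Set.contains (pvAttB M) (p.1, q.1) = true then (1:Int) else 0)).sum)).sum := by
  show (PySem.List.enumerate M 0).foldl (fun acc p =>
      (PySem.List.enumerate p.2 0).foldl (fun acc q =>
        acc + (if q.2 = 0 ∧ ¬ PySem.Set.contains (pvAttB M) (p.1, q.1) = true then (1:Int) else 0)) acc) 0 = _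
  refine Eq.trans (PySem.List.foldl_congr_mem _ _ (fun acc p => acc +
      ((PySem.List.enumerate p.2 0).map (fun q =>
        if q.2 = 0 ∧ ¬ PySem.Set.contains (pvAttB M) (p.1, q.1) = true then (1:Int) else 0)).sum) _
    (fun acc p _ => PySem.List.foldl_add (PySem.List.enumerate p.2 0) (fun q =>
        if q.2 = 0 ∧ ¬ PySem.Set.contains (pvAttB M) (p.1, q.1) = true then (1:Int) else 0) acc)) ?_
  rw [PySem.List.foldl_add]
  exact zero_add _

lemma pvAget_elem (M : List (List Int)) (i j : Nat) (hi : i < M.length)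
    (hj : j < (M[i]'hi).length) : pvAget M (i : Int) (j : Int) = (M[i]'hi)[j]'hj := by
  unfold pvAget
  simp only [Int.toNat_natCast]
  rw [List.getD_eq_getElem _ _ hi, List.getD_eq_getElem _ _ hj]

lemma pvA_eq_count (M : List (List Int)) :
    bishops_and_rooks M =
      (((PySem.List.pyRange 0 (pvN M) 1).foldl
        (fun G i => (PySem.List.pyRange 0 (pvM M) 1).foldl
          (fun G j => pvBodyA (pvN M) (pvM M) G i j) G) M).map (fun row =>
        (row.map (fun c => if c = 0 then (1:Int) else 0)).sum)).sum := by
  show ((PySem.List.pyRange 0 (pvN M) 1).foldl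
      (fun G i => (PySem.List.pyRange 0 (pvM M) 1).foldl
        (fun G j => pvBodyA (pvN M) (pvM M) G i j) G) M).foldl
      (fun acc row => row.foldl (fun a c => a + (if c = 0 then (1:Int) else 0)) acc) 0 = _
  refine Eq.trans (PySem.List.foldl_congr_mem _ _ (fun acc row => acc +
      (row.map (fun c => if c = 0 then (1:Int) else 0)).sum) _
    (fun acc row _ => PySem.List.foldl_add row (fun c => if c = 0 then (1:Int) else 0) acc)) ?_
  rw [PySem.List.foldl_add]
  exact zero_add _

-- ===== VERDICT (by name: the statement is the Claim_ definition above) =====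
theorem bishops_and_rooks_spec : Claim_equal_bishops_and_rooks := by
  intro M _ hpre
  show bishops_and_rooks M = bishops_and_rooks_alt M
  rw [pvA_eq_count M, pvAlt_eq_count M]
  obtain ⟨h1, h2, _, h4, h5⟩ := pvRel_final M hpre
  apply congrArg List.sum
  apply List.ext_getElem
  · simp [h1, PySem.List.length_enumerate]
  · intro i hi1 hi2
    rw [List.length_map] at hi1 hi2
    have hiM : i < M.length := by rwa [h1] at hi1
    have hiE : i < (PySem.List.enumerate M 0).length := by
      rwa [PySem.List.length_enumerate]
    rw [List.getElem_map, List.getElem_map, PySem.List.getElem_enumerate]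
    apply congrArg List.sum
    apply List.ext_getElem
    · have := h2 i
      rw [List.getD_eq_getElem _ _ hi1, List.getD_eq_getElem _ _ hiM] at this
      simp [PySem.List.length_enumerate, this]
    · intro j hj1 hj2
      rw [List.length_map] at hj1 hj2
      have hjG := hj1
      have hjM : j < (M[i]'hiM).length := by
        have := h2 i
        rw [List.getD_eq_getElem _ _ hi1, List.getD_eq_getElem _ _ hiM] at this
        omega
      have hjE : j < (PySem.List.enumerate (M[i]'hiM) 0).length := by
        rwa [PySem.List.length_enumerate]
      rw [List.getElem_map, List.getElem_map, PySem.List.getElem_enumerate]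
      simp only [zero_add]
      have hGval : pvAget ((PySem.List.pyRange 0 (pvN M) 1).foldl
          (fun G i => (PySem.List.pyRange 0 (pvM M) 1).foldl
            (fun G j => pvBodyA (pvN M) (pvM M) G i j) G) M) (i : Int) (j : Int) =
          ((((PySem.List.pyRange 0 (pvN M) 1).foldl
          (fun G i => (PySem.List.pyRange 0 (pvM M) 1).foldl
            (fun G j => pvBodyA (pvN M) (pvM M) G i j) G) M)[i]'hi1)[j]'hjG) :=
        pvAget_elem _ i j hi1 hjG
      have hMval : pvAget M (i : Int) (j : Int) = (M[i]'hiM)[j]'hjM :=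
        pvAget_elem M i j hiM hjM
      by_cases hS : pvSfin M (i : Int) (j : Int)
      · have hv2 := h4 _ _ hS
        rw [hGval] at hv2
        rw [hv2]
        have hcont : PySem.Set.contains (pvAttB M) ((i:Int), (j:Int)) = true := by
          rw [PySem.Set.contains_iff]
          exact (pvAttB_char M ((i:Int), (j:Int))).2 hS
        rw [if_neg (by omega), if_neg (by rw [hcont]; simp)]
      · have hv := h5 _ _ (Int.natCast_nonneg i) (Int.natCast_nonneg j) hS
        rw [hGval, hMval] at hv
        rw [hv]
        have hcont : ¬ PySem.Set.contains (pvAttB M) ((i:Int), (j:Int)) = true := by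
          rw [PySem.Set.contains_iff]
          exact fun hmem => hS ((pvAttB_char M ((i:Int), (j:Int))).1 hmem)
        by_cases hz : (M[i]'hiM)[j]'hjM = 0
        · rw [if_pos hz, if_pos ⟨hz, hcont⟩]
        · rw [if_neg hz, if_neg (fun hc => hz hc.1)]
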